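-- pv_equiv track=rewrite | github.com/dchampion/crypto | src/primes.py | factor_n
-- ===== SOURCE A (Python) =====
-- def factor_n(n):
--     """
--     Converts input n to the form 2^exp * mult + 1, where mult is the greatest odd
--     divisor of n - 1, and returns mult and exp.
--     """
--     assert n >= 3 and n % 2 != 0,   "n must be an odd integer > 2"
--
--     mult = n - 1
--     exp = 0
--
--     while mult % 2 == 0:
--         mult //= 2
--         exp += 1
--
--     return mult, exp
-- ===== SOURCE B (Python) =====
-- def factor_n(n):
--     """
--     Converts input n to the form 2^exp * mult + 1, where mult is the greatest odd
--     divisor of n - 1, and returns mult and exp.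
--     """
--     assert n >= 3 and n % 2 != 0,   "n must be an odd integer > 2"
--
--     v = n - 1
--     exp = (v & -v).bit_length() - 1
--     return v >> exp, exp
-- ===== Notes on version B (the rewrite author's own statement) =====
-- stated objective: idiomatic
-- what changed: Replaces the repeated-halving while-loop by a closed-form bit computation: the 2-adic valuation exp is read off as (v & -v).bit_length() - 1 (isolating the lowest set bit) and the odd part is v >> exp.
import Mathlib
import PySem

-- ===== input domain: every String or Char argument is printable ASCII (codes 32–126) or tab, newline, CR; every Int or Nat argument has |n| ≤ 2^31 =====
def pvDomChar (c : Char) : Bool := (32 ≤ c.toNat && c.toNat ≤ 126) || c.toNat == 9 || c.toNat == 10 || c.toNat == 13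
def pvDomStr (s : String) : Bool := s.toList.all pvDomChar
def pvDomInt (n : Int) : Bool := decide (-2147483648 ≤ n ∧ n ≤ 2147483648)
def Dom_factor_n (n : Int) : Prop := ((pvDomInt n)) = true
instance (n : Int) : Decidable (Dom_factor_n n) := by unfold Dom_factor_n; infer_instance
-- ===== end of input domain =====

-- B replaces A's halving loop by the closed-form bit computation exp = (v & -v).bit_length() - 1, mult = v >> exp (idiomatic; same cost class).


-- ===== PORT A =====
-- the body of A's while-loop; 'mult ≠ 0' is a totality guard only (Python diverges at
-- mult = 0, which Pre_ makes unreachable: under the assert, mult = n - 1 ≥ 2)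
def factorLoop (mult exp : Int) : Int × Int :=
  if h : PySem.Int.mod mult 2 = 0 ∧ mult ≠ 0 then
    factorLoop (PySem.Int.floordiv mult 2) (exp + 1)
  else
    (mult, exp)
termination_by mult.natAbs
decreasing_by
  obtain ⟨h2, h0⟩ := h
  obtain ⟨k, hk⟩ := (PySem.Int.mod_eq_zero_iff_dvd mult 2).1 h2
  subst hk
  rw [PySem.Int.floordiv_eq_ediv_of_pos (by norm_num : (0:Int) < 2), Int.mul_ediv_cancel_left _ (by norm_num)]
  omega

-- the Python 'assert n >= 3 and n % 2 != 0' raises AssertionError outside Pre_factor_n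
def factor_n (n : Int) : Int × Int :=
  factorLoop (n - 1) 0

-- ===== PORT B =====
-- 'v >> exp': Python raises for exp < 0 (unreachable here: under the assert v ≥ 2, so
-- v & -v ≥ 1 and exp = bit_length - 1 ≥ 0); '.toNat' only converts the ≥ 0 shift amount
def factor_n_alt (n : Int) : Int × Int :=
  let v := n - 1
  let exp : Int := (PySem.Int.bitLength (PySem.Int.band v (-v)) : Int) - 1
  (v >>> exp.toNat, exp)

-- ===== PRECONDITION & SPEC =====
-- exactly the inputs accepted by A's assert; elsewhere both Pythons raise AssertionError
def Pre_factor_n (n : Int) : Prop := 3 ≤ n ∧ n % 2 ≠ 0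
instance (n : Int) : Decidable (Pre_factor_n n) := by unfold Pre_factor_n; infer_instance
def pvWitness_factor_n : Int := 13

def Spec_factor_n (n : Int) (out : Int × Int) : Prop := out = factor_n_alt n
instance (n : Int) (out : Int × Int) : Decidable (Spec_factor_n n out) := by unfold Spec_factor_n; infer_instance

-- ===== CLAIM (what is proved, stated in full; the proofs are below) =====
def Claim_equal_factor_n : Prop := ∀ (n : Int), Dom_factor_n n → Pre_factor_n n → Spec_factor_n n (factor_n n)

-- ===== LEMMAS AND PROOFS =====

-- m AND (m-1) clears the lowest set bit
lemma and_pred_odd (m : Nat) (h : m % 2 = 1) : m &&& (m - 1) = m - 1 := by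
  apply Nat.eq_of_testBit_eq
  intro i
  cases i with
  | zero =>
      have h1 : (m - 1) % 2 = 0 := by omega
      simp [Nat.testBit_zero, h, h1]
  | succ i =>
      have h2 : (m - 1) / 2 = m / 2 := by omega
      rw [Nat.testBit_and, Nat.testBit_succ, Nat.testBit_succ, h2, Bool.and_self]

lemma and_pred_even (m : Nat) (h0 : 0 < m) (h : m % 2 = 0) :
    m &&& (m - 1) = 2 * ((m / 2) &&& (m / 2 - 1)) := by
  apply Nat.eq_of_testBit_eq
  intro i
  cases i with
  | zero =>
      simp [Nat.testBit_zero, h, Nat.mul_mod_right]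
  | succ i =>
      have h2 : (m - 1) / 2 = m / 2 - 1 := by omega
      have h3 : 2 * (m / 2 &&& (m / 2 - 1)) / 2 = m / 2 &&& (m / 2 - 1) := by omega
      rw [Nat.testBit_and, Nat.testBit_succ, Nat.testBit_succ, Nat.testBit_succ, h2, h3,
        Nat.testBit_and]

-- the loop computes (m / 2^e, exp + e) where 2^e = m - (m AND (m-1)) is the lowest set bit
lemma loop_char : ∀ m : Nat, 0 < m → ∃ e : Nat,
    m - (m &&& (m - 1)) = 2 ^ e ∧
    ∀ exp : Int, factorLoop (m : Int) exp = (((m / 2 ^ e : Nat) : Int), exp + (e : Int)) := by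
  intro m
  induction m using Nat.strong_induction_on with
  | _ m ih =>
    intro hm
    rcases Nat.even_or_odd m with he | ho
    · have h : m % 2 = 0 := Nat.even_iff.1 he
      have hlt : m / 2 < m := by omega
      have hpos : 0 < m / 2 := by omega
      obtain ⟨e, hf, hl⟩ := ih (m / 2) hlt hpos
      refine ⟨e + 1, ?_, ?_⟩
      · have hb := and_pred_even m hm h
        have hle : m / 2 &&& (m / 2 - 1) ≤ m / 2 := Nat.and_le_left
        have : m / 2 - (m / 2 &&& (m / 2 - 1)) = 2 ^ e := hf
        rw [hb, pow_succ]
        omega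
      · intro exp
        rw [factorLoop]
        have hg : PySem.Int.mod (m : Int) 2 = 0 ∧ (m : Int) ≠ 0 := by
          constructor
          · rw [show ((2 : Int)) = ((2 : Nat) : Int) by norm_num, PySem.Int.mod_natCast, h]
            rfl
          · exact_mod_cast hm.ne'
        rw [dif_pos hg]
        have hd : PySem.Int.floordiv (m : Int) 2 = ((m / 2 : Nat) : Int) := by
          exact_mod_cast PySem.Int.floordiv_natCast m 2
        rw [hd, hl (exp + 1)]
        have hdd : m / 2 ^ (e + 1) = m / 2 / 2 ^ e := by
          rw [Nat.div_div_eq_div_mul, pow_succ, Nat.mul_comm (2 ^ e) 2, Nat.mul_comm 2 (2 ^ e)]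
        rw [hdd, Prod.mk.injEq]
        exact ⟨rfl, by push_cast; ring⟩
    · have h : m % 2 = 1 := Nat.odd_iff.1 ho
      refine ⟨0, ?_, ?_⟩
      · rw [and_pred_odd m h]; omega
      · intro exp
        rw [factorLoop]
        have hg : ¬ (PySem.Int.mod (m : Int) 2 = 0 ∧ (m : Int) ≠ 0) := by
          intro ⟨h2, _⟩
          rw [show ((2 : Int)) = ((2 : Nat) : Int) by norm_num, PySem.Int.mod_natCast, h] at h2
          exact absurd h2 (by norm_num)
        rw [dif_neg hg]
        simp

lemma bitLength_two_pow (e : Nat) : PySem.Int.bitLength (((2 ^ e : Nat) : Int)) = e + 1 := by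
  induction e with
  | zero =>
      rw [pow_zero, PySem.Int.bitLength_natCast (m := 1) (by norm_num)]
      norm_num [PySem.Int.bitLength_zero]
  | succ e ih =>
      rw [PySem.Int.bitLength_natCast (m := 2 ^ (e + 1)) (by positivity)]
      have : 2 ^ (e + 1) / 2 = 2 ^ e := by rw [pow_succ]; omega
      rw [this, ih]

lemma int_shiftRight_natCast (m e : Nat) : ((m : Int) >>> e) = ((m >>> e : Nat) : Int) := rfl

-- ===== VERDICT (by name: the statement is the Claim_ definition above) =====
theorem factor_n_spec : Claim_equal_factor_n := by
  intro n _ hpre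
  obtain ⟨h3, hodd⟩ := hpre
  unfold Spec_factor_n factor_n
  obtain ⟨m, hm⟩ : ∃ m : Nat, n - 1 = (m : Int) := ⟨(n - 1).toNat, by omega⟩
  have hmpos : 0 < m := by omega
  obtain ⟨e, hf, hl⟩ := loop_char m hmpos
  -- evaluate v & -v: for v = m > 0 it is m - (m AND (m-1)), the lowest set bit
  have hband : PySem.Int.band (n - 1) (-(n - 1)) = ((2 ^ e : Nat) : Int) := by
    rw [PySem.Int.band.eq_1]
    have h1 : (0 : Int) ≤ n - 1 := by omega
    have h2 : ¬ (0 : Int) ≤ -(n - 1) := by omega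
    rw [if_pos h1, if_neg h2]
    have ht1 : (n - 1).toNat = m := by omega
    have ht2 : (-(-(n - 1)) - 1).toNat = m - 1 := by omega
    rw [ht1, ht2, ← hf]
  have hexp : (PySem.Int.bitLength (PySem.Int.band (n - 1) (-(n - 1))) : Int) - 1 = (e : Int) := by
    rw [hband, bitLength_two_pow]; push_cast; ring
  have halt : factor_n_alt n =
      ((n - 1) >>> ((PySem.Int.bitLength (PySem.Int.band (n - 1) (-(n - 1))) : Int) - 1).toNat,
        (PySem.Int.bitLength (PySem.Int.band (n - 1) (-(n - 1))) : Int) - 1) := rfl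
  rw [halt, hexp, hm, hl 0]
  have hsh : ((m : Int) >>> ((e : Int)).toNat) = ((m / 2 ^ e : Nat) : Int) := by
    rw [Int.toNat_natCast, int_shiftRight_natCast, Nat.shiftRight_eq_div_pow]
  rw [hsh, Prod.mk.injEq]
  exact ⟨rfl, by ring⟩
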